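-- pv_equiv track=rewrite | github.com/thu-nics/R2R | script/data_labeling/auto_scheduler.py | split_data_ranges
-- ===== SOURCE A (Python) =====
-- from typing import List, Dict, Tuple, Optional, Set, Any
--
-- def split_data_ranges(total_samples: int, num_workers: int) -> List[Tuple[int, int]]:
--     """Split data into ranges for workers."""
--     if num_workers <= 0:
--         raise ValueError("num_workers must be positive")
--
--     chunk_size = total_samples // num_workers
--     remainder = total_samples % num_workers
--
--     ranges = []
--     current_low = 0
--
--     for i in range(num_workers):
--         current_chunk_size = chunk_size + (1 if i < remainder else 0)
--         current_high = current_low + current_chunk_size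
--
--         if current_low < total_samples:
--             ranges.append((current_low, min(current_high, total_samples)))
--             current_low = current_high
--
--     return ranges
-- ===== SOURCE B (Python) =====
-- def split_data_ranges(total_samples, num_workers):
--     """Split data into ranges for workers."""
--     if num_workers <= 0:
--         raise ValueError("num_workers must be positive")
--
--     chunk_size = total_samples // num_workers
--     remainder = total_samples % num_workers
--
--     def boundary(i):
--         return i * chunk_size + min(i, remainder)
--
--     return [(boundary(i), boundary(i + 1))
--             for i in range(num_workers) if boundary(i) < total_samples]
-- ===== Notes on version B (the rewrite author's own statement) =====
-- stated objective: simpler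
-- what changed: Replaces the sequential current_low accumulator and min() clamp with a closed-form boundary function (i*chunk_size + min(i, remainder)); each worker's range is the pair of adjacent boundaries, kept while the lower boundary is below total_samples.
import Mathlib
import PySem

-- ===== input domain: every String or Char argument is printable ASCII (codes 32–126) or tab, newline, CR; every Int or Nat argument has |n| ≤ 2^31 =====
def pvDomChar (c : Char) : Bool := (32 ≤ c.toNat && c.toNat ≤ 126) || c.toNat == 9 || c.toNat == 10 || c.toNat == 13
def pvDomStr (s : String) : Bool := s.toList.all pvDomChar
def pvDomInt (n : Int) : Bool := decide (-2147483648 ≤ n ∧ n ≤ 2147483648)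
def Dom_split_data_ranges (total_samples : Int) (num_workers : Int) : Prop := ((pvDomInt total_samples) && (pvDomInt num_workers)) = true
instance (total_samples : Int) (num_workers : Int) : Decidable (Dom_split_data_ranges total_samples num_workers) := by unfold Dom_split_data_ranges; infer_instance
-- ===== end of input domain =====

-- B replaces A's running current_low accumulator by a closed-form boundary list paired adjacently (simpler decomposition, same cost).

-- ===== PORT A =====
def split_data_ranges (total_samples : Int) (num_workers : Int) : List (Int × Int) :=
  let chunk_size := PySem.Int.floordiv total_samples num_workers
  let remainder := PySem.Int.mod total_samples num_workers
  let st := (PySem.List.pyRange 0 num_workers 1).foldl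
    (fun (st : List (Int × Int) × Int) i =>
      let current_chunk_size := chunk_size + (if i < remainder then 1 else 0)
      let current_high := st.2 + current_chunk_size
      if st.2 < total_samples then (st.1 ++ [(st.2, min current_high total_samples)], current_high)
      else st)
    ([], 0)
  st.1

-- ===== PORT B =====
def split_data_ranges_alt (total_samples : Int) (num_workers : Int) : List (Int × Int) :=
  let chunk_size := PySem.Int.floordiv total_samples num_workers
  let remainder := PySem.Int.mod total_samples num_workers
  let boundary := fun (i : Int) => i * chunk_size + min i remainder
  ((PySem.List.pyRange 0 num_workers 1).filter
      (fun i => decide (boundary i < total_samples))).map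
    (fun i => (boundary i, boundary (i + 1)))

-- ===== PRECONDITION & SPEC =====
-- Pre_ excludes exactly num_workers ≤ 0, where the Python A (and B) raise ValueError.
def Pre_split_data_ranges (total_samples : Int) (num_workers : Int) : Prop := 1 ≤ num_workers
instance (total_samples : Int) (num_workers : Int) : Decidable (Pre_split_data_ranges total_samples num_workers) := by unfold Pre_split_data_ranges; infer_instance
def pvWitness_split_data_ranges : Int × Int := (10, 3)

def Spec_split_data_ranges (total_samples : Int) (num_workers : Int) (out : List (Int × Int)) : Prop := out = split_data_ranges_alt total_samples num_workers
instance (total_samples : Int) (num_workers : Int) (out : List (Int × Int)) : Decidable (Spec_split_data_ranges total_samples num_workers out) := by unfold Spec_split_data_ranges; infer_instance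

-- ===== CLAIM (what is proved, stated in full; the proofs are below) =====
def Claim_equal_split_data_ranges : Prop := ∀ (total_samples : Int) (num_workers : Int), Dom_split_data_ranges total_samples num_workers → Pre_split_data_ranges total_samples num_workers → Spec_split_data_ranges total_samples num_workers (split_data_ranges total_samples num_workers)

-- ===== LEMMAS AND PROOFS =====

-- the closed-form boundary function shared by the analysis
def pvB (c r i : Int) : Int := i * c + min i r

-- A's loop body, named for the proofs
def pvStep (t c r : Int) (st : List (Int × Int) × Int) (i : Int) : List (Int × Int) × Int :=
  let current_chunk_size := c + (if i < r then 1 else 0)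
  let current_high := st.2 + current_chunk_size
  if st.2 < t then (st.1 ++ [(st.2, min current_high t)], current_high) else st

lemma portA_eq (t nw : Int) :
    split_data_ranges t nw =
      ((PySem.List.pyRange 0 nw 1).foldl
        (pvStep t (PySem.Int.floordiv t nw) (PySem.Int.mod t nw)) ([], 0)).1 := rfl

lemma pvB_zero (c r : Int) (hr : 0 ≤ r) : pvB c r 0 = 0 := by
  simp [pvB]; omega

lemma pvB_succ (c r k : Int) : pvB c r (k + 1) = pvB c r k + (c + (if k < r then 1 else 0)) := by
  unfold pvB
  have h : (k + 1) * c = k * c + c := by ring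
  rw [h]
  split_ifs <;> omega

lemma pvB_mono (c r i j : Int) (hc : 0 ≤ c) (hij : i ≤ j) : pvB c r i ≤ pvB c r j := by
  unfold pvB
  have h1 : min i r ≤ min j r := min_le_min hij le_rfl
  nlinarith [mul_nonneg (sub_nonneg.2 hij) hc]

lemma pvB_nw (c r nw : Int) (hr : r < nw) : pvB c r nw = nw * c + r := by
  unfold pvB; omega

-- for t ≤ 0 no boundary below nw ever drops beneath t
lemma pvB_ge_of_nonpos (t c r nw : Int) (hnw : 1 ≤ nw) (hr0 : 0 ≤ r) (hrlt : r < nw)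
    (hid : nw * c + r = t) (ht : t ≤ 0) (k : Int) (h0 : 0 ≤ k) (hk : k ≤ nw) :
    t ≤ pvB c r k := by
  have hc : c ≤ 0 := by nlinarith
  unfold pvB
  rcases eq_or_lt_of_le hc with hc0 | hc1
  · subst hc0; simp at *; omega
  · have hc1 : c ≤ -1 := by omega
    by_cases hkr : k ≤ r
    · rw [min_eq_left hkr]
      nlinarith [mul_le_mul_of_nonneg_left hc1 (show (0:Int) ≤ nw - k by omega)]
    · rw [min_eq_right (by omega : r ≤ k)]
      nlinarith [mul_le_mul_of_nonneg_left hc1 (show (0:Int) ≤ nw - k by omega)]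

lemma c_nonneg (t c r nw : Int) (hnw : 1 ≤ nw) (hr0 : 0 ≤ r) (hrlt : r < nw)
    (hid : nw * c + r = t) (ht : 0 < t) : 0 ≤ c := by
  by_contra hneg
  push_neg at hneg
  have h1 : c ≤ -1 := by omega
  nlinarith [mul_le_mul_of_nonneg_left h1 (show (0:Int) ≤ nw by omega)]

lemma pvB_succ_le (t c r nw : Int) (hnw : 1 ≤ nw) (hr0 : 0 ≤ r) (hrlt : r < nw)
    (hid : nw * c + r = t) (ht : 0 < t) (k : Int) (hk : k + 1 ≤ nw) :
    pvB c r (k + 1) ≤ t := by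
  have hc := c_nonneg t c r nw hnw hr0 hrlt hid ht
  have := pvB_mono c r (k + 1) nw hc hk
  rw [pvB_nw c r nw hrlt] at this
  omega

-- A's fold while every boundary so far is below t
lemma foldA_all (t c r : Int) (hr0 : 0 ≤ r) (n : Nat)
    (h : ∀ k : Nat, k < n → pvB c r k < t) :
    (List.range n).foldl (fun st (k : Nat) => pvStep t c r st (k : Int)) ([], 0) =
      ((List.range n).map (fun k : Nat => (pvB c r k, min (pvB c r ((k : Int) + 1)) t)),
        pvB c r n) := by
  induction n with
  | zero => simp [pvB_zero c r hr0]
  | succ n ih =>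
    have hall : ∀ k : Nat, k < n → pvB c r k < t := fun k hk => h k (by omega)
    rw [List.range_succ, List.foldl_append, List.map_append, ih hall]
    have hn : pvB c r n < t := h n (by omega)
    simp only [List.foldl_cons, List.foldl_nil, pvStep]
    rw [if_pos hn]
    push_cast
    rw [← pvB_succ c r n]
    simp

-- once a boundary reaches t the loop is frozen
lemma foldA_stop (t c r : Int) (hr0 : 0 ≤ r) (m n : Nat) (hmn : m ≤ n)
    (hpre : ∀ k : Nat, k < m → pvB c r k < t) (hstop : t ≤ pvB c r m) :
    (List.range n).foldl (fun st (k : Nat) => pvStep t c r st (k : Int)) ([], 0) =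
      ((List.range m).map (fun k : Nat => (pvB c r k, min (pvB c r ((k : Int) + 1)) t)),
        pvB c r m) := by
  induction n, hmn using Nat.le_induction with
  | base => exact foldA_all t c r hr0 m hpre
  | succ n hn ih =>
    rw [List.range_succ, List.foldl_append, ih]
    simp only [List.foldl_cons, List.foldl_nil, pvStep]
    rw [if_neg (by omega)]

-- B reduced to a filter-map over List.range
lemma portB_eq (t nw : Int) (hnw : 1 ≤ nw) :
    split_data_ranges_alt t nw =
      ((List.range nw.toNat).filter
          (fun k : Nat => decide (pvB (PySem.Int.floordiv t nw) (PySem.Int.mod t nw) (k : Int) < t))).map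
        (fun k : Nat =>
          (pvB (PySem.Int.floordiv t nw) (PySem.Int.mod t nw) (k : Int),
           pvB (PySem.Int.floordiv t nw) (PySem.Int.mod t nw) ((k : Int) + 1))) := by
  set c := PySem.Int.floordiv t nw with hc
  set r := PySem.Int.mod t nw with hr
  unfold split_data_ranges_alt
  rw [← hc, ← hr]
  rw [PySem.List.pyRange_one 0 nw]
  have h1 : (nw - 0).toNat = nw.toNat := by omega
  rw [h1]
  have hcast : (fun k : Nat => (0 : Int) + (k : Int)) = (fun k : Nat => (k : Int)) := by
    funext k; rw [zero_add]
  simp only [hcast, List.filter_map, List.map_map]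
  rfl

-- A reduced to a fold of pvStep over List.range
lemma portA_range (t nw : Int) (hnw : 1 ≤ nw) :
    split_data_ranges t nw =
      ((List.range nw.toNat).foldl
        (fun st (k : Nat) => pvStep t (PySem.Int.floordiv t nw) (PySem.Int.mod t nw) st (k : Int))
        ([], 0)).1 := by
  rw [portA_eq, PySem.List.pyRange_one 0 nw]
  have h1 : (nw - 0).toNat = nw.toNat := by omega
  rw [h1, List.foldl_map]
  simp

lemma range_filter_prefix (t c r : Int) (n m : Nat) (hmn : m ≤ n)
    (hpre : ∀ k : Nat, k < m → pvB c r k < t)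
    (hpost : ∀ k : Nat, m ≤ k → k < n → t ≤ pvB c r k) :
    (List.range n).filter (fun k : Nat => decide (pvB c r k < t)) = List.range m := by
  have hn : n = m + (n - m) := by omega
  rw [hn, List.range_add, List.filter_append]
  rw [List.filter_eq_self.2 (by intro k hk; simp at hk ⊢; exact hpre k hk)]
  rw [List.filter_eq_nil_iff.2 ?_, List.append_nil]
  intro k hk
  simp only [List.mem_map, List.mem_range] at hk
  obtain ⟨j, hj, rfl⟩ := hk
  simp only [decide_eq_true_eq, not_lt]
  exact hpost (m + j) (by omega) (by omega)

-- the core equivalence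
lemma main_eq (t nw : Int) (hnw : 1 ≤ nw) :
    split_data_ranges t nw = split_data_ranges_alt t nw := by
  set c := PySem.Int.floordiv t nw with hc
  set r := PySem.Int.mod t nw with hr
  have hr0 : 0 ≤ r := PySem.Int.mod_nonneg t (by omega : (0:Int) < nw)
  have hrlt : r < nw := PySem.Int.mod_lt t (by omega : (0:Int) < nw)
  have hid : nw * c + r = t := by
    have := PySem.Int.floordiv_mul_add_mod t nw
    rw [← hc, ← hr] at this; linarith [this]
  have hnwNat : ((nw.toNat : Int)) = nw := by omega
  rw [portA_range t nw hnw, portB_eq t nw hnw, ← hc, ← hr]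
  by_cases ht : t ≤ 0
  · -- t ≤ 0 : both sides are empty
    rw [foldA_stop t c r hr0 0 nw.toNat (by omega)
        (by intro k hk; omega) (by norm_num [pvB_zero c r hr0]; omega)]
    rw [range_filter_prefix t c r nw.toNat 0 (by omega) (by intro k hk; omega) ?_]
    · simp
    · intro k _ hkn
      exact pvB_ge_of_nonpos t c r nw hnw hr0 hrlt hid ht k (by omega) (by omega)
  · -- t > 0
    push_neg at ht
    have hcnn : 0 ≤ c := c_nonneg t c r nw hnw hr0 hrlt hid ht
    have hmin : ∀ k : Nat, k < nw.toNat →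
        min (pvB c r ((k : Int) + 1)) t = pvB c r ((k : Int) + 1) := by
      intro k hk
      exact min_eq_left (pvB_succ_le t c r nw hnw hr0 hrlt hid ht k (by omega))
    by_cases hall : ∀ k : Nat, k < nw.toNat → pvB c r k < t
    · rw [foldA_all t c r hr0 nw.toNat hall]
      rw [List.filter_eq_self.2 (by
        intro k hk
        simp only [List.mem_range] at hk
        simp only [decide_eq_true_eq]
        exact hall k hk)]
      apply List.map_congr_left
      intro k hk
      simp only [List.mem_range] at hk
      rw [hmin k hk]
    · push_neg at hall
      have hex : ∃ m : Nat, t ≤ pvB c r m := ⟨hall.choose, hall.choose_spec.2⟩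
      set m := Nat.find hex with hm
      have hstop : t ≤ pvB c r m := Nat.find_spec hex
      have hpre : ∀ k : Nat, k < m → pvB c r k < t := by
        intro k hk
        have := Nat.find_min hex hk
        omega
      have hmlt : m < nw.toNat := by
        have := Nat.find_min' hex hall.choose_spec.2
        have := hall.choose_spec.1
        omega
      rw [foldA_stop t c r hr0 m nw.toNat (by omega) hpre hstop]
      rw [range_filter_prefix t c r nw.toNat m (by omega) hpre ?_]
      · apply List.map_congr_left
        intro k hk
        simp only [List.mem_range] at hk
        rw [hmin k (by omega)]
      · intro k hmk hkn
        calc t ≤ pvB c r m := hstop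
          _ ≤ pvB c r k := pvB_mono c r m k hcnn (by exact_mod_cast hmk)

-- ===== VERDICT (by name: the statement is the Claim_ definition above) =====
theorem split_data_ranges_spec : Claim_equal_split_data_ranges := by
  intro t nw _ hpre
  unfold Spec_split_data_ranges
  exact main_eq t nw hpre
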